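-- pv_equiv track=rewrite | github.com/spoopr/advent | 21/21/solution.py | calculate
-- ===== SOURCE A (Python) =====
-- z = lambda a : answer if (answer:= a%10) != 0 else 10
--
-- def calculate(pos, strategy=False):
--   rolls = 0
--   total = 0
--   while True:
--     options = [z(pos+x) for x in range(3,10)]
--     options.sort(reverse=strategy)
--     rolls += 3
--     total += options[0]
--     if total >= 21:
--       return rolls, total
-- ===== SOURCE B (Python) =====
-- def _die_value(a):
--     r = a % 10
--     return r if r != 0 else 10
--
-- def calculate(pos, strategy=False):
--     vals = [_die_value(pos + x) for x in range(3, 10)]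
--     step = max(vals) if strategy else min(vals)
--     iterations = -(-21 // step)  # ceil(21 / step)
--     return 3 * iterations, step * iterations
-- ===== Notes on version B (the rewrite author's own statement) =====
-- stated objective: simpler
-- what changed: B replaces A's while-loop that re-sorts the seven die values every turn and accumulates rolls/total by computing the constant per-turn step once (min or max of the values) and returning the answer in closed form via a ceiling division.
import Mathlib
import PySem

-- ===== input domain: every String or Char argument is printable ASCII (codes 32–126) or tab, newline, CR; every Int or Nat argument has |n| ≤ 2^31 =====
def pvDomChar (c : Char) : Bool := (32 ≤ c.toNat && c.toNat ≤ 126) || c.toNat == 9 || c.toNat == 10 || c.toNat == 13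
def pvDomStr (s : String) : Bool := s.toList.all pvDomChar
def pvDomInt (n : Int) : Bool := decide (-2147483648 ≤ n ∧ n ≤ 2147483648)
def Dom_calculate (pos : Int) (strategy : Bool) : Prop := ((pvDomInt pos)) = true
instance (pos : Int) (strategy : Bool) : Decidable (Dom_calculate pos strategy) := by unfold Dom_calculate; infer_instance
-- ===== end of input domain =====

-- B replaces A's repeated sort-and-accumulate loop by computing the constant per-turn
-- step once (min/max of the seven die values) and a closed-form ceiling division (simpler).

-- ===== PORT A =====
-- z = lambda a : answer if (answer := a % 10) != 0 else 10
def pvZ (a : Int) : Int :=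
  let answer := PySem.Int.mod a 10
  if answer ≠ 0 then answer else 10

-- the 'while True' loop; fuel 21 suffices (each iteration adds ≥ 1 to total, which
-- stops at 21), so the fuel-0 branch is never reached — proved via the equivalence.
def pvLoop : Nat → Int → Bool → Int → Int → Int × Int
  | 0, _, _, rolls, total => (rolls, total)
  | n + 1, pos, strategy, rolls, total =>
      let options := PySem.List.sorted ((PySem.List.pyRange 3 10 1).map (fun x => pvZ (pos + x))) (fun v => v) strategy
      let rolls := rolls + 3
      -- options[0]: the list has exactly 7 elements, so Python never raises here
      let total := total + options.headD 0
      if total ≥ 21 then (rolls, total) else pvLoop n pos strategy rolls total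

def calculate (pos : Int) (strategy : Bool) : Int × Int :=
  pvLoop 21 pos strategy 0 0

-- ===== PORT B =====
def pvDie (a : Int) : Int :=
  let r := PySem.Int.mod a 10
  if r ≠ 0 then r else 10

def calculate_alt (pos : Int) (strategy : Bool) : Int × Int :=
  let vals := (PySem.List.pyRange 3 10 1).map (fun x => pvDie (pos + x))
  -- max(vals)/min(vals): vals has 7 elements, so Python never raises here
  let step := if strategy then (PySem.List.max? vals (fun v => v)).getD 0
              else (PySem.List.min? vals (fun v => v)).getD 0
  let iterations := -(PySem.Int.floordiv (-21) step)
  (3 * iterations, step * iterations)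

-- ===== PRECONDITION & SPEC =====
def Spec_calculate (pos : Int) (strategy : Bool) (out : Int × Int) : Prop := out = calculate_alt pos strategy
instance (pos : Int) (strategy : Bool) (out : Int × Int) : Decidable (Spec_calculate pos strategy out) := by unfold Spec_calculate; infer_instance

-- ===== CLAIM (what is proved, stated in full; the proofs are below) =====
def Claim_equal_calculate : Prop := ∀ (pos : Int) (strategy : Bool), Dom_calculate pos strategy → Spec_calculate pos strategy (calculate pos strategy)

-- ===== LEMMAS AND PROOFS =====
lemma pvZ_shift (pos x : Int) : pvZ (pos + x) = pvZ (pos % 10 + x) := by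
  unfold pvZ
  rw [PySem.Int.mod_eq_emod_of_pos (by norm_num), PySem.Int.mod_eq_emod_of_pos (by norm_num),
    show (pos + x) % 10 = (pos % 10 + x) % 10 by omega]

lemma pvLoop_mod (n : Nat) (pos : Int) (s : Bool) (r t : Int) :
    pvLoop n pos s r t = pvLoop n (pos % 10) s r t := by
  induction n generalizing r t with
  | zero => rfl
  | succ n ih =>
    simp only [pvLoop]
    rw [show (fun x => pvZ (pos + x)) = (fun x => pvZ (pos % 10 + x)) from
      funext fun x => pvZ_shift pos x]
    split <;> [rfl; exact ih _ _]

lemma alt_mod (pos : Int) (s : Bool) :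
    calculate_alt pos s = calculate_alt (pos % 10) s := by
  unfold calculate_alt
  rw [show (fun x => pvDie (pos + x)) = (fun x => pvDie (pos % 10 + x)) from
    funext fun x => (pvZ_shift pos x : pvDie (pos + x) = pvDie (pos % 10 + x))]

lemma key_small (p : Int) (h1 : 0 ≤ p) (h2 : p < 10) (s : Bool) :
    calculate p s = calculate_alt p s := by
  interval_cases p <;> cases s <;> decide

-- ===== VERDICT (by name: the statement is the Claim_ definition above) =====
theorem calculate_spec : Claim_equal_calculate := by
  intro pos strategy _
  unfold Spec_calculate
  have hA : calculate pos strategy = calculate (pos % 10) strategy := by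
    unfold calculate; exact pvLoop_mod 21 pos strategy 0 0
  rw [hA, alt_mod pos strategy]
  exact key_small _ (Int.emod_nonneg _ (by norm_num)) (Int.emod_lt_of_pos _ (by norm_num)) strategy
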